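-- pv_equiv track=rewrite | github.com/basf/metis-backend | metis_backend/structures/__init__.py | html_formula
-- ===== SOURCE A (Python) =====
-- def html_formula(given_string):
--
--     sub, formula = False, ''
--
--     for token in given_string:
--         if token.isdigit() or token == '.' or token == '-':
--             if not sub:
--                 formula += '<sub>'
--                 sub = True
--         else:
--             if sub and token != 'd':
--                 formula += '</sub>'
--                 sub = False
--         formula += token
--
--     if sub:
--         formula += '</sub>'
--
--     return formula
-- ===== SOURCE B (Python) =====
-- import re
--
-- def html_formula(given_string):
--     return re.sub(r'[0-9.\-][0-9.\-d]*',
--                   lambda m: '<sub>' + m.group(0) + '</sub>',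
--                   given_string)
-- ===== Notes on version B (the rewrite author's own statement) =====
-- stated objective: idiomatic
-- what changed: Replaced the explicit sub-flag state machine with a single declarative re.sub over the pattern [0-9.\-][0-9.\-d]* that wraps each maximal subscript run.
import Mathlib
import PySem

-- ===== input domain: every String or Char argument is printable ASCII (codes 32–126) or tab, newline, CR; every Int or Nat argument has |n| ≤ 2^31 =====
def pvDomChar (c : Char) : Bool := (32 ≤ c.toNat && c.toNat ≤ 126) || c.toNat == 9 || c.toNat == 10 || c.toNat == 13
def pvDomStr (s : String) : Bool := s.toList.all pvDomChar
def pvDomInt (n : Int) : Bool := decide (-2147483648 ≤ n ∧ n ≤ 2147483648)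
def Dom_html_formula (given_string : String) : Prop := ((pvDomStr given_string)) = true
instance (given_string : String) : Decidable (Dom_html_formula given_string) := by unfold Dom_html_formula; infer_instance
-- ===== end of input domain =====

-- B replaces A's explicit sub-flag state machine by one declarative regex substitution (idiomatic).

-- ===== PORT A =====
-- a character that opens/extends a subscript run: digit, '.' or '-' (exact on ASCII domain)
def pvOpener (c : Char) : Bool := c.isDigit || c = '.' || c = '-'

-- A's loop: state (sub, formula), one step per character, then the trailing close tag
def pvGoA (sub : Bool) (formula : List Char) : List Char → List Char
  | [] => if sub then formula ++ "</sub>".toList else formula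
  | token :: rest =>
      if pvOpener token then
        pvGoA true (formula ++ (if sub then [] else "<sub>".toList) ++ [token]) rest
      else if sub && token ≠ 'd' then
        pvGoA false (formula ++ "</sub>".toList ++ [token]) rest
      else
        pvGoA sub (formula ++ [token]) rest

def html_formula (given_string : String) : String :=
  String.mk (pvGoA false [] given_string.toList)

-- ===== PORT B =====
-- continuation class of the regex: [0-9.\-d]
def pvCont (c : Char) : Bool := pvOpener c || c = 'd'

-- re.sub scanner: at each position, either a maximal match [0-9.\-][0-9.\-d]* is wrapped, or the char is copied
def pvGoB : List Char → List Char
  | [] => []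
  | c :: rest =>
      if pvOpener c then
        "<sub>".toList ++ c :: rest.takeWhile pvCont ++ "</sub>".toList ++ pvGoB (rest.dropWhile pvCont)
      else
        c :: pvGoB rest
  termination_by l => l.length
  decreasing_by
    · exact Nat.lt_succ_of_le (by simpa using List.length_dropWhile_le pvCont rest)
    · simp

def html_formula_alt (given_string : String) : String :=
  String.mk (pvGoB given_string.toList)

-- ===== PRECONDITION & SPEC =====
def Spec_html_formula (given_string : String) (out : String) : Prop := out = html_formula_alt given_string
instance (given_string : String) (out : String) : Decidable (Spec_html_formula given_string out) := by unfold Spec_html_formula; infer_instance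

-- ===== CLAIM (what is proved, stated in full; the proofs are below) =====
def Claim_equal_html_formula : Prop := ∀ (given_string : String), Dom_html_formula given_string → Spec_html_formula given_string (html_formula given_string)

-- ===== LEMMAS AND PROOFS =====

-- the accumulator factors out of A's loop
theorem pvGoA_acc (l : List Char) : ∀ (sub : Bool) (acc : List Char),
    pvGoA sub acc l = acc ++ pvGoA sub [] l := by
  induction l with
  | nil => intro sub acc; cases sub <;> simp [pvGoA]
  | cons c rest ih =>
      intro sub acc
      by_cases h : pvOpener c = true
      · have e1 : ∀ acc' : List Char, pvGoA sub acc' (c :: rest)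
            = pvGoA true (acc' ++ (if sub then [] else "<sub>".toList) ++ [c]) rest := by
          intro acc'; simp [pvGoA, h]
        rw [e1 acc, ih]; conv_rhs => rw [e1 [], ih]
        simp
      · cases sub with
        | false =>
            have e1 : ∀ acc' : List Char, pvGoA false acc' (c :: rest)
                = pvGoA false (acc' ++ [c]) rest := by
              intro acc'; simp [pvGoA, h]
            rw [e1 acc, ih]; conv_rhs => rw [e1 [], ih]
            simp
        | true =>
            by_cases hd : c = 'd'
            · have e1 : ∀ acc' : List Char, pvGoA true acc' (c :: rest)
                  = pvGoA true (acc' ++ [c]) rest := by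
                intro acc'; simp [pvGoA, h, hd]
              rw [e1 acc, ih]; conv_rhs => rw [e1 [], ih]
              simp
            · have e1 : ∀ acc' : List Char, pvGoA true acc' (c :: rest)
                  = pvGoA false (acc' ++ "</sub>".toList ++ [c]) rest := by
                intro acc'; simp [pvGoA, h, hd]
              rw [e1 acc, ih]; conv_rhs => rw [e1 [], ih]
              simp

-- joint characterisation: A's loop in either state equals B's scanner (plus run tail in the open state)
theorem pvGoA_eq_goB (n : ℕ) : ∀ (l : List Char), l.length ≤ n →
    pvGoA false [] l = pvGoB l ∧
    pvGoA true [] l = l.takeWhile pvCont ++ "</sub>".toList ++ pvGoB (l.dropWhile pvCont) := by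
  induction n with
  | zero =>
      intro l hl
      have : l = [] := List.eq_nil_of_length_eq_zero (Nat.le_zero.mp hl)
      subst this; simp [pvGoA, pvGoB]
  | succ n ih =>
      intro l hl
      match l with
      | [] => simp [pvGoA, pvGoB]
      | c :: rest =>
        have hr : rest.length ≤ n := Nat.lt_succ_iff.mp (by simpa using hl)
        have h1 := (ih rest hr).1
        have h2 := (ih rest hr).2
        constructor
        · by_cases h : pvOpener c = true
          · have step : pvGoA false [] (c :: rest)
                = pvGoA true ("<sub>".toList ++ [c]) rest := by
              simp [pvGoA, h]
            rw [step, pvGoA_acc rest true ("<sub>".toList ++ [c]), h2]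
            simp [pvGoB, h]
          · have step : pvGoA false [] (c :: rest) = pvGoA false [c] rest := by
              simp [pvGoA, h]
            rw [step, pvGoA_acc rest false [c], h1]
            simp [pvGoB, h]
        · by_cases h : pvOpener c = true
          · have hc : pvCont c = true := by simp [pvCont, h]
            have step : pvGoA true [] (c :: rest) = pvGoA true [c] rest := by
              simp [pvGoA, h]
            rw [step, pvGoA_acc rest true [c], h2]
            simp [List.takeWhile_cons, List.dropWhile_cons, hc]
          · by_cases hd : c = 'd'
            · have hc : pvCont c = true := by simp [pvCont, hd]
              have step : pvGoA true [] (c :: rest) = pvGoA true [c] rest := by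
                simp [pvGoA, h, hd]
              rw [step, pvGoA_acc rest true [c], h2]
              simp [List.takeWhile_cons, List.dropWhile_cons, hc]
            · have hc : pvCont c = false := by simp [pvCont, h, hd]
              have step : pvGoA true [] (c :: rest)
                  = pvGoA false ("</sub>".toList ++ [c]) rest := by
                simp [pvGoA, h, hd]
              rw [step, pvGoA_acc rest false ("</sub>".toList ++ [c]), h1]
              simp [pvGoB, List.takeWhile_cons, List.dropWhile_cons, hc, h]

-- ===== VERDICT (by name: the statement is the Claim_ definition above) =====
theorem html_formula_spec : Claim_equal_html_formula := by
  intro s _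
  unfold Spec_html_formula html_formula html_formula_alt
  rw [(pvGoA_eq_goB s.toList.length s.toList le_rfl).1]
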